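-- pv_equiv track=rewrite | github.com/MarianoSanti01/facultad | Programacion/Python/tp8/tp8functions.py | potency
-- ===== SOURCE A (Python) =====
-- def potency(n,b):
--     if n < 1 or b <2:
--         return False
--     if n == 1:
--         return True
--     if n%b!=0:
--         return False
--     return potency(n//b,b)
-- ===== SOURCE B (Python) =====
-- def potency(n, b):
--     if n < 1 or b < 2:
--         return False
--     while n != 1:
--         if n % b != 0:
--             return False
--         n //= b
--     return True
-- ===== Notes on version B (the rewrite author's own statement) =====
-- stated objective: idiomatic
-- what changed: Replaces tail recursion with an explicit while-loop: one up-front guard, then repeatedly divide by b until n reaches 1.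
import Mathlib
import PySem

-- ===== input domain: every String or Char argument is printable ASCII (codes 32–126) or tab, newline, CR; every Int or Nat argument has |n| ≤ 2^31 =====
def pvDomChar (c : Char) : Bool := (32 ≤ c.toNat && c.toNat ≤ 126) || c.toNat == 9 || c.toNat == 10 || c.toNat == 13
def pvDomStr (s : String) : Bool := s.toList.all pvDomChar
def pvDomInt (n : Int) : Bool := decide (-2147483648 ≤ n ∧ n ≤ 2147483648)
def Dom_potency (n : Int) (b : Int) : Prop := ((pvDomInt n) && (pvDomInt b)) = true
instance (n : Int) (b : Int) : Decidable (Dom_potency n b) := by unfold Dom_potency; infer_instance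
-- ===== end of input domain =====

-- B rewrites A's tail recursion as an explicit while-loop (guard once, then divide until n = 1); same values everywhere.

theorem pv_floordiv_lt (n b : Int) (hn : 2 ≤ n) (hb : 2 ≤ b) :
    (PySem.Int.floordiv n b).toNat < n.toNat := by
  rw [PySem.Int.floordiv_eq_ediv_of_pos (by omega)]
  have h1 : n / b < n := by
    rw [Int.ediv_lt_iff_lt_mul (by omega)]
    nlinarith
  have h2 : 0 ≤ n / b := Int.ediv_nonneg (by omega) (by omega)
  omega

-- ===== PORT A =====
def potency (n : Int) (b : Int) : Bool :=
  if n < 1 || b < 2 then false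
  else if n == 1 then true
  else if PySem.Int.mod n b != 0 then false
  else potency (PySem.Int.floordiv n b) b
termination_by n.toNat
decreasing_by
  simp only [Bool.or_eq_true, decide_eq_true_eq, not_or, beq_iff_eq] at *
  exact pv_floordiv_lt n b (by omega) (by omega)

-- ===== PORT B =====
-- the while-loop of Source B; the `n ≤ 1 ∨ b < 2` guard only makes the recursion total
-- (the caller always passes 1 ≤ n and 2 ≤ b, where it is exactly `while n != 1`)
def potencyWhile (n : Int) (b : Int) : Bool :=
  if n ≤ 1 ∨ b < 2 then n == 1
  else if PySem.Int.mod n b != 0 then false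
  else potencyWhile (PySem.Int.floordiv n b) b
termination_by n.toNat
decreasing_by
  simp only [not_or] at *
  exact pv_floordiv_lt n b (by omega) (by omega)

def potency_alt (n : Int) (b : Int) : Bool :=
  if n < 1 || b < 2 then false
  else potencyWhile n b

-- ===== PRECONDITION & SPEC =====
def Spec_potency (n : Int) (b : Int) (out : Bool) : Prop := out = potency_alt n b
instance (n : Int) (b : Int) (out : Bool) : Decidable (Spec_potency n b out) := by unfold Spec_potency; infer_instance

-- ===== CLAIM (what is proved, stated in full; the proofs are below) =====
def Claim_equal_potency : Prop := ∀ (n : Int) (b : Int), Dom_potency n b → Spec_potency n b (potency n b)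

-- ===== LEMMAS AND PROOFS =====
theorem potency_eq_while (n b : Int) (hn : 1 ≤ n) (hb : 2 ≤ b) :
    potency n b = potencyWhile n b := by
  by_cases h1 : n = 1
  · subst h1
    rw [potency, potencyWhile]
    simp
    omega
  · have hn2 : 2 ≤ n := by omega
    by_cases hm : PySem.Int.mod n b = 0
    · have hdvd : b ∣ n := (PySem.Int.mod_eq_zero_iff_dvd n b).mp hm
      have hbn : b ≤ n := Int.le_of_dvd (by omega) hdvd
      have hq1 : 1 ≤ PySem.Int.floordiv n b := by
        rw [PySem.Int.floordiv_eq_ediv_of_pos (by omega)]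
        exact (Int.le_ediv_iff_mul_le (by omega)).mpr (by omega)
      rw [potency, potencyWhile]
      simp [h1, hm, show ¬ n < 1 by omega, show ¬ b < 2 by omega, show ¬ n ≤ 1 by omega]
      exact potency_eq_while (PySem.Int.floordiv n b) b hq1 hb
    · rw [potency, potencyWhile]
      simp [h1, hm, show ¬ n < 1 by omega, show ¬ b < 2 by omega, show ¬ n ≤ 1 by omega]
termination_by n.toNat
decreasing_by exact pv_floordiv_lt n b hn2 hb

-- ===== VERDICT (by name: the statement is the Claim_ definition above) =====
theorem potency_spec : Claim_equal_potency := by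
  intro n b _
  unfold Spec_potency potency_alt
  by_cases h : n < 1 ∨ b < 2
  · rw [potency]
    have hg : (n < 1 || b < 2) = true := by simp; omega
    rw [if_pos hg, if_pos hg]
  · rw [potency_eq_while n b (by omega) (by omega)]
    have hg : (n < 1 || b < 2) = false := by simp; omega
    rw [if_neg (show ¬((n < 1 || b < 2) = true) by simp; omega)]
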